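-- pv_equiv track=rewrite | github.com/input-output-hk/acropolis | modules/governance_state/data/check_conway_syncdb.py | screen_strings
-- ===== SOURCE A (Python) =====
-- def screen_strings(header):
--     inside = False
--     prev = " "
--     out = ""
--     for ptr in range(0,len(header)):
--         if prev == '\"' and header[ptr] != '\"':
--             inside = not inside
--
--         if header[ptr] == ',' and inside:
--             out += ';'
--         else:
--             out += header[ptr]
--         prev = header[ptr]
--
--     return out
-- ===== SOURCE B (Python) =====
-- def screen_strings(header):
--     def split_run(s, is_quote):
--         i = 0
--         while i < len(s) and (s[i] == '"') == is_quote: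
--             i += 1
--         return s[:i], s[i:]
--
--     out = []
--     odd = False
--     rest = header
--     while rest:
--         if rest[0] == '"':
--             run, rest = split_run(rest, True)
--             out.append(run)
--             odd = not odd
--         else:
--             seg, rest = split_run(rest, False)
--             out.append(seg.replace(',', ';') if odd else seg)
--     return ''.join(out)
-- ===== Notes on version B (the rewrite author's own statement) =====
-- stated objective: alternative
-- what changed: A's char-by-char state machine (inside flag + prev char) is replaced by splitting the header into maximal quote-runs and non-quote segments and rewriting commas in segments that follow an odd number of quote-runs.
import Mathlib
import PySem

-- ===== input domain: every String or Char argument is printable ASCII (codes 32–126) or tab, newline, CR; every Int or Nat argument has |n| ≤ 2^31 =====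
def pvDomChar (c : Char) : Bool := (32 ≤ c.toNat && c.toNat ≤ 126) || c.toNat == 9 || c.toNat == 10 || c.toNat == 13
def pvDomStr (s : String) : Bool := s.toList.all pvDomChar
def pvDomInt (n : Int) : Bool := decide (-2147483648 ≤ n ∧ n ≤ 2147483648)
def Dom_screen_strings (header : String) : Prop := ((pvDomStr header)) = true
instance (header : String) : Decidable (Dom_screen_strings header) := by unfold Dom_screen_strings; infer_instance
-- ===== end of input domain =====

-- B replaces A's char-by-char state machine (inside/prev flags) by splitting the string into
-- maximal quote-runs and non-quote segments and rewriting commas in segments after an odd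
-- number of quote-runs; objective: alternative (no speed claim).

-- ===== PORT A =====
-- step of A's for-loop: state = (inside, prev, out)
def screenStep (s : Bool × Char × List Char) (c : Char) : Bool × Char × List Char :=
  let inside := if s.2.1 = '"' ∧ c ≠ '"' then !s.1 else s.1
  (inside, c, s.2.2 ++ [if c = ',' ∧ inside then ';' else c])

def screen_strings (header : String) : String :=
  let r := header.toList.foldl screenStep (false, ' ', [])
  String.mk r.2.2

-- ===== PORT B =====
-- Source B's while loop over `rest`: peel a maximal quote-run or non-quote segment each round
def altGo : List Char → Bool → List Char
  | [], _ => []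
  | c :: rest, odd =>
    if c = '"' then
      (c :: rest).takeWhile (· = '"') ++ altGo ((c :: rest).dropWhile (· = '"')) (!odd)
    else
      (if odd then ((c :: rest).takeWhile (· ≠ '"')).map (fun d => if d = ',' then ';' else d)
       else (c :: rest).takeWhile (· ≠ '"')) ++ altGo ((c :: rest).dropWhile (· ≠ '"')) odd
termination_by l _ => l.length
decreasing_by
  · simp only [List.dropWhile]
    have h : decide (c = '"') = true := by simp_all
    rw [h]
    exact Nat.lt_succ_of_le (List.length_dropWhile_le _ _)
  · simp only [List.dropWhile]
    have h : decide (c ≠ '"') = true := by simp_all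
    rw [h]
    exact Nat.lt_succ_of_le (List.length_dropWhile_le _ _)

def screen_strings_alt (header : String) : String :=
  String.mk (altGo header.toList false)

-- ===== PRECONDITION & SPEC =====
def Spec_screen_strings (header : String) (out : String) : Prop := out = screen_strings_alt header
instance (header : String) (out : String) : Decidable (Spec_screen_strings header out) := by unfold Spec_screen_strings; infer_instance

-- ===== CLAIM (what is proved, stated in full; the proofs are below) =====
def Claim_equal_screen_strings : Prop := ∀ (header : String), Dom_screen_strings header → Spec_screen_strings header (screen_strings header)

-- ===== LEMMAS AND PROOFS =====

-- folding A's step over a run of quote characters: inside unchanged, run copied verbatim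
theorem fold_quote_run (run : List Char) (hrun : ∀ c ∈ run, c = '"') :
    ∀ (b : Bool) (p : Char) (acc : List Char),
      List.foldl screenStep (b, p, acc) run = (b, run.getLastD p, acc ++ run) := by
  induction run with
  | nil => intro b p acc; simp
  | cons c t ih =>
    intro b p acc
    have hc : c = '"' := hrun c (by simp)
    have ht : ∀ d ∈ t, d = '"' := fun d hd => hrun d (by simp [hd])
    simp only [List.foldl_cons]
    have hstep : screenStep (b, p, acc) c = (b, c, acc ++ [c]) := by
      simp [screenStep, hc]
    rw [hstep, ih ht, List.getLastD_cons]
    simp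

-- folding A's step over non-quote chars from a non-quote prev: inside constant, commas mapped
theorem fold_seg (seg : List Char) (hseg : ∀ c ∈ seg, c ≠ '"') :
    ∀ (b : Bool) (p : Char), p ≠ '"' → ∀ (acc : List Char),
      List.foldl screenStep (b, p, acc) seg =
        (b, seg.getLastD p, acc ++ seg.map (fun c => if c = ',' ∧ b then ';' else c)) := by
  induction seg with
  | nil => intro b p _ acc; simp
  | cons c t ih =>
    intro b p hp acc
    have hc : c ≠ '"' := hseg c (by simp)
    have ht : ∀ d ∈ t, d ≠ '"' := fun d hd => hseg d (by simp [hd])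
    simp only [List.foldl_cons]
    have hstep : screenStep (b, p, acc) c = (b, c, acc ++ [if c = ',' ∧ b then ';' else c]) := by
      simp [screenStep, hp]
    rw [hstep, ih ht b c hc, List.getLastD_cons]
    simp

theorem mem_takeWhile_pred (p : Char → Bool) (l : List Char) (a : Char)
    (h : a ∈ l.takeWhile p) : p a = true := by
  induction l with
  | nil => simp [List.takeWhile] at h
  | cons c t ih =>
    rw [List.takeWhile_cons] at h
    by_cases hc : p c
    · simp [hc] at h
      rcases h with h | h
      · subst h; exact hc
      · exact ih h
    · simp [hc] at h

theorem getLastD_of_ne_nil (l : List Char) (hne : l ≠ []) (p : Char) :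
    l.getLastD p = l.getLast hne := by
  rw [List.getLastD_eq_getLast?, List.getLast?_eq_some_getLast (h := hne)]
  rfl

theorem getLastD_quote (run : List Char) (hne : run ≠ []) (hrun : ∀ c ∈ run, c = '"') (p : Char) :
    run.getLastD p = '"' := by
  rw [getLastD_of_ne_nil run hne]
  exact hrun _ (List.getLast_mem hne)

theorem getLastD_seg (seg : List Char) (hseg : ∀ c ∈ seg, c ≠ '"') (p : Char) (hp : p ≠ '"') :
    seg.getLastD p ≠ '"' := by
  cases hne : seg with
  | nil => simpa using hp
  | cons a l =>
    have h : seg ≠ [] := by simp [hne]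
    rw [← hne, getLastD_of_ne_nil seg h]
    exact hseg _ (List.getLast_mem h)

-- main invariant, by strong induction on the length of the remaining input
theorem main_inv : ∀ (n : Nat) (l : List Char), l.length ≤ n → ∀ (b : Bool) (acc : List Char),
    (∀ p : Char, p ≠ '"' → (List.foldl screenStep (b, p, acc) l).2.2 = acc ++ altGo l b)
    ∧ (l.head? ≠ some '"' → (List.foldl screenStep (b, '"', acc) l).2.2 = acc ++ altGo l (!b)) := by
  intro n
  induction n with
  | zero =>
    intro l hl b acc
    have : l = [] := List.length_eq_zero_iff.mp (Nat.le_zero.mp hl)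
    subst this
    constructor
    · intro p _; simp [altGo]
    · intro _; simp [altGo]
  | succ n ih =>
    intro l hl b acc
    cases l with
    | nil =>
      constructor
      · intro p _; simp [altGo]
      · intro _; simp [altGo]
    | cons c t =>
      by_cases hc : c = '"'
      · -- quote run first
        subst hc
        constructor
        · intro p hp
          have hdec : List.dropWhile (fun d => d = '"') ('"' :: t) = List.dropWhile (fun d => d = '"') t := by
            simp [List.dropWhile]
          have hsplit : ('"' :: t) = ('"' :: t).takeWhile (· = '"') ++ ('"' :: t).dropWhile (· = '"') :=
            (List.takeWhile_append_dropWhile).symm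
          set run := ('"' :: t).takeWhile (· = '"') with hrdef
          set rest := ('"' :: t).dropWhile (· = '"') with hrest
          have hrunq : ∀ c ∈ run, c = '"' := by
            intro c hcm
            have := mem_takeWhile_pred (fun d => decide (d = '"')) ('"' :: t) c (by simpa [hrdef] using hcm)
            simpa using this
          have hrunne : run ≠ [] := by
            simp [hrdef, List.takeWhile]
          have hrestlen : rest.length ≤ n := by
            have h1 : rest.length ≤ t.length := by
              rw [hrest]
              simpa using (List.length_dropWhile_le (fun d => decide (d = '"')) t)
            have h2 : t.length ≤ n := Nat.le_of_succ_le_succ (by simpa using hl)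
            omega
          have hresthd : rest.head? ≠ some '"' := by
            cases hr : rest with
            | nil => simp
            | cons a r =>
              have hne' : List.dropWhile (fun d => decide (d = '"')) ('"' :: t) ≠ [] := by
                rw [← hrest, hr]; simp
              have := List.head_dropWhile_not (fun d => decide (d = '"')) hne'
              have ha : (List.dropWhile (fun d => decide (d = '"')) ('"' :: t)).head hne' = a := by
                have : List.dropWhile (fun d => decide (d = '"')) ('"' :: t) = a :: r := by
                  rw [← hrest]; exact hr
                simp [this]
              rw [ha] at this
              simpa [hr] using this
          conv_lhs => rw [hsplit]
          rw [List.foldl_append, fold_quote_run run hrunq b p acc,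
              getLastD_quote run hrunne hrunq p]
          have := (ih rest hrestlen b (acc ++ run)).2 hresthd
          rw [this]
          have haltgo : altGo ('"' :: t) b = run ++ altGo rest (!b) := by
            rw [altGo]; simp [hrdef, hrest]
          rw [haltgo, List.append_assoc]
        · intro hhd
          simp at hhd
      · -- non-quote segment first
        have hsplit : (c :: t) = (c :: t).takeWhile (· ≠ '"') ++ (c :: t).dropWhile (· ≠ '"') :=
          (List.takeWhile_append_dropWhile).symm
        set seg := (c :: t).takeWhile (· ≠ '"') with hsdef
        set rest := (c :: t).dropWhile (· ≠ '"') with hrest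
        have hsegq : ∀ d ∈ seg, d ≠ '"' := by
          intro d hdm
          have := mem_takeWhile_pred (fun d => decide (d ≠ '"')) (c :: t) d (by simpa [hsdef] using hdm)
          simpa using this
        have hrestlen : rest.length ≤ n := by
          have h1 : rest.length ≤ t.length := by
            have : rest = List.dropWhile (fun d => decide (d ≠ '"')) t := by
              rw [hrest]; simp [List.dropWhile, hc]
            rw [this]
            exact List.length_dropWhile_le _ t
          have h2 : t.length ≤ n := Nat.le_of_succ_le_succ (by simpa using hl)
          omega
        have haltgo : ∀ bb : Bool, altGo (c :: t) bb =
            (if bb then seg.map (fun d => if d = ',' then ';' else d) else seg) ++ altGo rest bb := by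
          intro bb
          rw [altGo]; simp [hc, hsdef, hrest]
        have hmap : ∀ bb : Bool, seg.map (fun d => if d = ',' ∧ bb then ';' else d) =
            (if bb then seg.map (fun d => if d = ',' then ';' else d) else seg) := by
          intro bb; cases bb <;> simp
        have hlast : ∀ p : Char, p ≠ '"' → seg.getLastD p ≠ '"' := fun p hp => getLastD_seg seg hsegq p hp
        have hrest_part1 : ∀ (bb : Bool) (acc' : List Char) (p : Char), p ≠ '"' →
            (List.foldl screenStep (bb, p, acc') rest).2.2 = acc' ++ altGo rest bb := by
          intro bb acc' p hp
          exact (ih rest hrestlen bb acc').1 p hp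
        constructor
        · intro p hp
          conv_lhs => rw [hsplit]
          rw [List.foldl_append, fold_seg seg hsegq b p hp acc,
              hrest_part1 b _ _ (hlast p hp), haltgo b, hmap b, List.append_assoc]
        · intro _
          conv_lhs => rw [hsplit]
          have hfirst : ∀ acc' : List Char, List.foldl screenStep (b, '"', acc') seg =
              (!b, seg.getLastD '"', acc' ++ seg.map (fun d => if d = ',' ∧ !b then ';' else d)) := by
            intro acc'
            cases hseg : seg with
            | nil =>
              exfalso
              have : c ∈ seg := by
                rw [hsdef]; simp [List.takeWhile, hc]
              rw [hseg] at this; simp at this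
            | cons a r =>
              have ha : a ≠ '"' := hsegq a (by simp [hseg])
              have hr : ∀ d ∈ r, d ≠ '"' := fun d hd => hsegq d (by simp [hseg, hd])
              simp only [List.foldl_cons]
              have hstep : screenStep (b, '"', acc') a = (!b, a, acc' ++ [if a = ',' ∧ !b then ';' else a]) := by
                simp [screenStep, ha]
              rw [hstep, fold_seg r hr (!b) a ha, List.getLastD_cons]
              simp
          -- getLastD seg '"' : head of seg is c ≠ '"', seg nonempty so last is in seg
          have hsegne : seg ≠ [] := by
            intro h
            have : c ∈ seg := by rw [hsdef]; simp [List.takeWhile, hc]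
            rw [h] at this; simp at this
          have hlast' : seg.getLastD '"' ≠ '"' := by
            rw [getLastD_of_ne_nil seg hsegne]
            exact hsegq _ (List.getLast_mem hsegne)
          rw [List.foldl_append, hfirst acc, hrest_part1 (!b) _ _ hlast',
              haltgo (!b), hmap (!b), List.append_assoc]

-- ===== VERDICT (by name: the statement is the Claim_ definition above) =====
theorem screen_strings_spec : Claim_equal_screen_strings := by
  intro header _
  unfold Spec_screen_strings screen_strings screen_strings_alt
  have := (main_inv header.toList.length header.toList le_rfl false []).1 ' ' (by decide)
  simp only [List.nil_append] at this
  simp [this]
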